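-- pv_equiv track=rewrite | github.com/Josrodjr/lenguajes_proyecto3 | p2/automata_builder/finite_automata/dfa.py | iter_approved_ids_overload
-- ===== SOURCE A (Python) =====
-- def iter_approved_ids_overload(local_state_trans):
--     if len(local_state_trans) == 0:
--         return 1
--     else:
--         in_list = []
--         for value in local_state_trans:
--             in_list.append(value)
--         in_list.sort()
--         return in_list[-1] + 1
-- ===== SOURCE B (Python) =====
-- def iter_approved_ids_overload(local_state_trans):
--     if len(local_state_trans) == 0:
--         return 1
--     m = local_state_trans[0]
--     for value in local_state_trans[1:]:
--         if value > m:
--             m = value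
--     return m + 1
-- ===== Notes on version B (the rewrite author's own statement) =====
-- stated objective: simpler
-- what changed: Replaced copy-then-sort-then-take-last with a single linear scan keeping a running maximum.
import Mathlib
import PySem

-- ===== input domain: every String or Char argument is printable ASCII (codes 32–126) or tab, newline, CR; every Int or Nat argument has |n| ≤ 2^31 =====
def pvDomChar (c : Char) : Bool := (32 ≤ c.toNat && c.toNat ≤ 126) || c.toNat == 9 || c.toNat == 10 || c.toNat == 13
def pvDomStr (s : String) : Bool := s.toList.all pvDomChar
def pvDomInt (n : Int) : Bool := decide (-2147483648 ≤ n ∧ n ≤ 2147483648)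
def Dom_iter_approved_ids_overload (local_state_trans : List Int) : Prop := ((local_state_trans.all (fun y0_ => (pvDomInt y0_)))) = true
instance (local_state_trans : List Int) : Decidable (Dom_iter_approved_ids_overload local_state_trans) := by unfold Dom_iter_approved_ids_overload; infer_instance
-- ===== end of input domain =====

-- B replaces copy-then-sort-then-take-last with a single running-maximum scan (simpler, one linear pass).


-- ===== PORT A =====
-- copy the list element by element, sort it, return last element + 1 (guarded: empty → 1)
def iter_approved_ids_overload (local_state_trans : List Int) : Int :=
  if local_state_trans.length = 0 then 1
  else
    let in_list := local_state_trans.foldl (fun acc value => acc ++ [value]) []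
    let sorted := PySem.List.sorted in_list (fun x => x) false
    (PySem.List.pyGet? sorted (-1)).getD 0 + 1

-- ===== PORT B =====
-- single pass: running maximum m over the tail, then m + 1 (empty → 1)
def iter_approved_ids_overload_alt (local_state_trans : List Int) : Int :=
  match local_state_trans with
  | [] => 1
  | m0 :: rest => rest.foldl (fun m value => if value > m then value else m) m0 + 1

-- ===== PRECONDITION & SPEC =====
def Spec_iter_approved_ids_overload (local_state_trans : List Int) (out : Int) : Prop := out = iter_approved_ids_overload_alt local_state_trans
instance (local_state_trans : List Int) (out : Int) : Decidable (Spec_iter_approved_ids_overload local_state_trans out) := by unfold Spec_iter_approved_ids_overload; infer_instance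

-- ===== CLAIM (what is proved, stated in full; the proofs are below) =====
def Claim_equal_iter_approved_ids_overload : Prop := ∀ (local_state_trans : List Int), Dom_iter_approved_ids_overload local_state_trans → Spec_iter_approved_ids_overload local_state_trans (iter_approved_ids_overload local_state_trans)

-- ===== LEMMAS AND PROOFS =====

-- B's scan step is exactly Int.max
theorem pvScan_eq_foldl_max (rest : List Int) (m0 : Int) :
    rest.foldl (fun m value => if value > m then value else m) m0 = rest.foldl max m0 := by
  induction rest generalizing m0 with
  | nil => rfl
  | cons y ys ih =>
      simp only [List.foldl_cons, ih]
      congr 1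
      by_cases h : y > m0 <;> simp [h] <;> omega

-- last element of a (· ≤ ·)-pairwise list is an upper bound
theorem pvPairwise_le_getLast : ∀ (l : List Int), l.Pairwise (· ≤ ·) →
    ∀ y ∈ l, y ≤ l.getLast?.getD 0 := by
  intro l hp
  induction l with
  | nil => intro y hy; cases hy
  | cons a t ih =>
      intro y hy
      rcases List.pairwise_cons.mp hp with ⟨ha, ht⟩
      cases t with
      | nil => simp at hy ⊢; omega
      | cons b s =>
          have hlast : (a :: b :: s).getLast?.getD 0 = (b :: s).getLast?.getD 0 := by
            simp [List.getLast?_cons_cons]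
          rw [hlast]
          rcases List.mem_cons.mp hy with rfl | hy'
          · exact le_trans (ha b (by simp)) (ih ht b (by simp))
          · exact ih ht y hy'

-- the foldl-append copy loop rebuilds the list
theorem pvFoldl_append : ∀ (l acc : List Int), l.foldl (fun a v => a ++ [v]) acc = acc ++ l := by
  intro l
  induction l with
  | nil => intro acc; simp
  | cons x xs ih => intro acc; simp [List.foldl_cons, ih]

-- getLast?.getD of a nonempty list is a member
theorem pvGetLastD_mem : ∀ (l : List Int), l ≠ [] → l.getLast?.getD 0 ∈ l := by
  intro l
  induction l with
  | nil => intro h; exact absurd rfl h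
  | cons a t ih =>
      intro _
      cases t with
      | nil => simp
      | cons b s =>
          rw [List.getLast?_cons_cons]
          exact List.mem_cons_of_mem a (ih (by simp))

theorem pvSorted_last_eq_max (m0 : Int) (rest : List Int) :
    (PySem.List.sorted (m0 :: rest) (fun x => x) false).getLast?.getD 0 = rest.foldl max m0 := by
  set s := PySem.List.sorted (m0 :: rest) (fun x => x) false with hs
  have hperm : s.Perm (m0 :: rest) := PySem.List.sorted_perm _ _ _
  have hpw : s.Pairwise (· ≤ ·) := by
    have := PySem.List.sorted_pairwise (xs := m0 :: rest) (key := fun x => x)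
    simpa [hs] using this
  have hne : s ≠ [] := by
    intro h; have := hperm.length_eq; simp [h] at this
  -- the last of s is a member of m0 :: rest
  have hlast_mem : s.getLast?.getD 0 ∈ (m0 :: rest) :=
    hperm.mem_iff.mp (pvGetLastD_mem s hne)
  -- the fold max is a member of m0 :: rest
  have hfold_mem : rest.foldl max m0 ∈ (m0 :: rest) := by
    rcases PySem.List.foldl_max_mem rest m0 with h | h
    · rw [h]; simp
    · simp [h]
  -- each bounds the other
  have h1 : s.getLast?.getD 0 ≤ rest.foldl max m0 := by
    rcases List.mem_cons.mp hlast_mem with h | h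
    · rw [h]; exact (PySem.List.le_foldl_max rest m0).1
    · exact (PySem.List.le_foldl_max rest m0).2 _ h
  have h2 : rest.foldl max m0 ≤ s.getLast?.getD 0 := by
    exact pvPairwise_le_getLast s hpw _ (hperm.mem_iff.mpr hfold_mem)
  omega

-- ===== VERDICT (by name: the statement is the Claim_ definition above) =====
theorem iter_approved_ids_overload_spec : Claim_equal_iter_approved_ids_overload := by
  intro l _
  unfold Spec_iter_approved_ids_overload iter_approved_ids_overload iter_approved_ids_overload_alt
  cases l with
  | nil => rfl
  | cons m0 rest =>
      have hcopy : (m0 :: rest).foldl (fun acc value => acc ++ [value]) [] = m0 :: rest := by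
        simpa using pvFoldl_append (m0 :: rest) []
      simp only [hcopy, PySem.List.pyGet?_neg_one, pvSorted_last_eq_max, pvScan_eq_foldl_max,
        List.length_cons]
      simp
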